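-- pv_equiv track=rewrite | github.com/danielenricocahall/AdventOfCode2024 | day_15/solution.py | build_map_and_movements
-- ===== SOURCE A (Python) =====
-- def build_map_and_movements(lines: list[str]) -> tuple[list[list[str]], str]:
--     map_from_lanternfish = []
--     movements = ""
--     finished_with_map: bool = False
--     for line in map(str.strip, lines):
--         if not line:
--             finished_with_map = True
--             continue
--         if not finished_with_map:
--             map_from_lanternfish.append(list(line))
--         else:
--             movements += line
--     return map_from_lanternfish, movements
-- ===== SOURCE B (Python) =====
-- def build_map_and_movements(lines: list[str]) -> tuple[list[list[str]], str]:
--     stripped = [l.strip() for l in lines]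
--     i = next((k for k, l in enumerate(stripped) if not l), len(stripped))
--     return [list(l) for l in stripped[:i]], "".join(l for l in stripped[i + 1:] if l)
-- ===== Notes on version B (the rewrite author's own statement) =====
-- stated objective: simpler
-- what changed: Replaces A's flag-driven single pass with a boundary-finding step (index of first blank stripped line) followed by two slice-based passes: a map comprehension over the prefix and a join over the non-blank suffix.
import Mathlib
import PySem

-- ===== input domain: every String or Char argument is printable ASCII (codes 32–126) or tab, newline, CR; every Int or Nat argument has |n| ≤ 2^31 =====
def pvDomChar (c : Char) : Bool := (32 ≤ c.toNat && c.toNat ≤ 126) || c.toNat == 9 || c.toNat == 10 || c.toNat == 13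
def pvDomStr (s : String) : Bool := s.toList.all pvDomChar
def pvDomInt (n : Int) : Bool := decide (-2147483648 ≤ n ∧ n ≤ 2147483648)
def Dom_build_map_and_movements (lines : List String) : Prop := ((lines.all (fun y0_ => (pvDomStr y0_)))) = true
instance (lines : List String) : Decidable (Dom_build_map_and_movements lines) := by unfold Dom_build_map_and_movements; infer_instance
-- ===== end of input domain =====

-- B replaces A's flag-driven single pass by finding the first blank stripped line and
-- taking two slice-shaped passes (map = prefix, movements = join of non-blank suffix); simpler decomposition, same cost.

-- ===== PORT A =====
-- one loop step of A: strip is applied by the loop's `map(str.strip, lines)`, see build_map_and_movements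
def pvStepA (st : List (List String) × String × Bool) (line : String) : List (List String) × String × Bool :=
  if line == "" then (st.1, st.2.1, true)
  else if !st.2.2 then (st.1 ++ [line.toList.map (fun c => String.mk [c])], st.2.1, st.2.2)
  else (st.1, st.2.1 ++ line, st.2.2)

def build_map_and_movements (lines : List String) : List (List String) × String :=
  let r := (lines.map PySem.Str.strip).foldl pvStepA ([], "", false)
  (r.1, r.2.1)

-- ===== PORT B =====
def build_map_and_movements_alt (lines : List String) : List (List String) × String :=
  let stripped := lines.map PySem.Str.strip
  let i := stripped.findIdx (fun l => l == "")   -- = length when no blank line, like next(..., len)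
  ((stripped.take i).map (fun l => l.toList.map (fun c => String.mk [c])),
   PySem.Str.join "" ((stripped.drop (i + 1)).filter (fun l => !(l == ""))))

-- ===== PRECONDITION & SPEC =====
def Spec_build_map_and_movements (lines : List String) (out : List (List String) × String) : Prop := out = build_map_and_movements_alt lines
instance (lines : List String) (out : List (List String) × String) : Decidable (Spec_build_map_and_movements lines out) := by unfold Spec_build_map_and_movements; infer_instance

-- ===== CLAIM (what is proved, stated in full; the proofs are below) =====
def Claim_equal_build_map_and_movements : Prop := ∀ (lines : List String), Dom_build_map_and_movements lines → Spec_build_map_and_movements lines (build_map_and_movements lines)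

-- ===== LEMMAS AND PROOFS =====

theorem pv_joinChars_cons (x : List Char) (xs : List (List Char)) :
    PySem.Chars.join [] (x :: xs) = x ++ PySem.Chars.join [] xs := by
  cases xs with
  | nil => simp [PySem.Chars.join_singleton, PySem.Chars.join_nil]
  | cons y ys => simp [PySem.Chars.join_cons_cons]

theorem pv_join_empty_cons (l : String) (rest : List String) :
    PySem.Str.join "" (l :: rest) = l ++ PySem.Str.join "" rest := by
  apply String.ext
  simp [PySem.Str.toList_join, pv_joinChars_cons]

theorem pv_join_empty_nil : PySem.Str.join "" ([] : List String) = "" := by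
  apply String.ext
  simp [PySem.Str.toList_join, PySem.Chars.join_nil]

-- after the first blank line A only concatenates the non-blank lines
theorem pv_foldl_true (ss : List String) (m : List (List String)) (s : String) :
    ss.foldl pvStepA (m, s, true)
      = (m, s ++ PySem.Str.join "" (ss.filter (fun l => !(l == ""))), true) := by
  induction ss generalizing s with
  | nil => simp [pv_join_empty_nil]
  | cons l rest ih =>
    by_cases h : l == ""
    · simp [pvStepA, h, ih]
    · simp only [List.foldl_cons, pvStepA, h]
      simp only [Bool.not_true, Bool.false_eq_true, if_false]
      rw [ih]
      simp [List.filter_cons, h, pv_join_empty_cons, String.append_assoc]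

-- before the first blank line A collects map rows; B's take/drop/join shape is the result
theorem pv_foldl_false (ss : List String) (m : List (List String)) (s : String) :
    (ss.foldl pvStepA (m, s, false)).1
      = m ++ ((ss.take (ss.findIdx (fun l => l == ""))).map
            (fun l => l.toList.map (fun c => String.mk [c])))
    ∧ (ss.foldl pvStepA (m, s, false)).2.1
      = s ++ PySem.Str.join ""
            ((ss.drop (ss.findIdx (fun l => l == "") + 1)).filter (fun l => !(l == ""))) := by
  induction ss generalizing m with
  | nil => simp [pv_join_empty_nil]
  | cons l rest ih =>
    by_cases h : l == ""
    · simp [pvStepA, h, List.findIdx_cons, pv_foldl_true]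
    · simp only [List.foldl_cons, pvStepA, h, List.findIdx_cons, cond_false, Bool.not_false,
        Bool.false_eq_true, if_false, if_true]
      obtain ⟨ih1, ih2⟩ := ih (m ++ [l.toList.map (fun c => String.mk [c])])
      refine ⟨?_, ?_⟩
      · rw [ih1]
        simp [List.take_succ_cons, List.append_assoc]
      · rw [ih2]
        simp [List.drop_succ_cons]

theorem build_map_and_movements_spec : Claim_equal_build_map_and_movements := by
  intro lines _
  unfold Spec_build_map_and_movements build_map_and_movements build_map_and_movements_alt
  obtain ⟨h1, h2⟩ := pv_foldl_false (lines.map PySem.Str.strip) [] ""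
  simp only [List.nil_append] at h1 h2
  rw [Prod.ext_iff]
  exact ⟨by simpa using h1, by simpa using h2⟩
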